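-- pv_equiv track=rewrite | github.com/ramnayudu/sahayak-ai | agentic-backend/shared/utils.py | get_difficulty_levels
-- ===== SOURCE A (Python) =====
-- from typing import Dict, Any, List, Optional, Tuple
--
-- def get_difficulty_levels(grades: List[int]) -> Dict[str, List[int]]:
--     """Categorize grades into difficulty levels."""
--     basic = [g for g in grades if g <= 3]
--     intermediate = [g for g in grades if 4 <= g <= 6]
--     advanced = [g for g in grades if g >= 7]
--
--     return {
--         "basic": basic,
--         "intermediate": intermediate,
--         "advanced": advanced
--     }
-- ===== SOURCE B (Python) =====
-- from typing import Dict, List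
--
-- def get_difficulty_levels(grades: List[int]) -> Dict[str, List[int]]:
--     """Categorize grades into difficulty levels via an arithmetic bucket index."""
--     names = ("basic", "intermediate", "advanced")
--     buckets = ([], [], [])
--     for g in grades:
--         buckets[min(2, max(0, (g - 1) // 3))].append(g)
--     return dict(zip(names, buckets))
-- ===== Notes on version B (the rewrite author's own statement) =====
-- stated objective: alternative
-- what changed: Replaces A's three comparison-based filtering passes with a single traversal that computes an arithmetic bucket index min(2, max(0, (g-1)//3)) and appends each grade into an indexed bucket table, building the dict from zip(names, buckets); no range comparisons remain.
import Mathlib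
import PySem

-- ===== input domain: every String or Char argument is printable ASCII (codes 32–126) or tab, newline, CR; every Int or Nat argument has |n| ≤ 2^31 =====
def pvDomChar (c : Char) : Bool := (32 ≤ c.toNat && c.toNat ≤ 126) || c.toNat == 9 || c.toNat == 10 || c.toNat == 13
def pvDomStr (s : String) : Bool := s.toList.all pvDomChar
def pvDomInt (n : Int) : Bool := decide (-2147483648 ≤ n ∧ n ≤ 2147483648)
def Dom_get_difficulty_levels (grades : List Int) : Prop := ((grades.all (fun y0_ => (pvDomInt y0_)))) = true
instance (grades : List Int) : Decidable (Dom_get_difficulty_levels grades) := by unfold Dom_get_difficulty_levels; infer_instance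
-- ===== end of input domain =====

-- B replaces A's three comparison-based filtering passes with one traversal that files each grade
-- into an indexed bucket table via the arithmetic index min(2, max(0, (g-1)//3)) (alternative decomposition, same cost class).


-- ===== PORT A =====
def get_difficulty_levels (grades : List Int) : List (String × List Int) :=
  let basic := grades.filter (fun g => g ≤ 3)
  let intermediate := grades.filter (fun g => 4 ≤ g && g ≤ 6)
  let advanced := grades.filter (fun g => g ≥ 7)
  [("basic", basic), ("intermediate", intermediate), ("advanced", advanced)]

-- ===== PORT B =====
-- bucket index: min(2, max(0, (g - 1) // 3)), Python floor division via PySem.Int.floordiv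
def gdl_idx (g : Int) : Int := min 2 (max 0 (PySem.Int.floordiv (g - 1) 3))

-- one fold step: append g to the bucket at its arithmetic index
def gdl_step (bs : List (List Int)) (g : Int) : List (List Int) :=
  let i := (gdl_idx g).toNat
  bs.set i ((bs.getD i []) ++ [g])

def get_difficulty_levels_alt (grades : List Int) : List (String × List Int) :=
  let buckets := grades.foldl gdl_step [[], [], []]
  List.zip ["basic", "intermediate", "advanced"] buckets

-- ===== PRECONDITION & SPEC =====
def Spec_get_difficulty_levels (grades : List Int) (out : List (String × List Int)) : Prop := out = get_difficulty_levels_alt grades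
instance (grades : List Int) (out : List (String × List Int)) : Decidable (Spec_get_difficulty_levels grades out) := by unfold Spec_get_difficulty_levels; infer_instance

-- ===== CLAIM =====
def Claim_equal_get_difficulty_levels : Prop := ∀ (grades : List Int), Dom_get_difficulty_levels grades → Spec_get_difficulty_levels grades (get_difficulty_levels grades)

-- ===== LEMMAS AND PROOFS =====

theorem gdl_idx_lo {g : Int} (h : g ≤ 3) : gdl_idx g = 0 := by
  unfold gdl_idx
  rw [PySem.Int.floordiv_eq_ediv_of_pos (by omega)]
  omega

theorem gdl_idx_mid {g : Int} (h1 : 4 ≤ g) (h2 : g ≤ 6) : gdl_idx g = 1 := by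
  unfold gdl_idx
  rw [PySem.Int.floordiv_eq_ediv_of_pos (by omega)]
  omega

theorem gdl_idx_hi {g : Int} (h : 7 ≤ g) : gdl_idx g = 2 := by
  unfold gdl_idx
  rw [PySem.Int.floordiv_eq_ediv_of_pos (by omega)]
  omega

theorem gdl_fold_inv (grades : List Int) (b0 b1 b2 : List Int) :
    grades.foldl gdl_step [b0, b1, b2]
    = [b0 ++ grades.filter (fun g => g ≤ 3),
       b1 ++ grades.filter (fun g => 4 ≤ g && g ≤ 6),
       b2 ++ grades.filter (fun g => g ≥ 7)] := by
  induction grades generalizing b0 b1 b2 with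
  | nil => simp
  | cons g t ih =>
    rw [List.foldl_cons, List.filter_cons, List.filter_cons, List.filter_cons]
    by_cases h1 : g ≤ 3
    · rw [show gdl_step [b0, b1, b2] g = [b0 ++ [g], b1, b2] by
        simp [gdl_step, gdl_idx_lo h1, List.getD], ih]
      have h2 : ¬ (4 ≤ g ∧ g ≤ 6) := by omega
      have h3 : ¬ g ≥ 7 := by omega
      simp [h1, h2, h3]
    · by_cases h2 : g ≤ 6
      · rw [show gdl_step [b0, b1, b2] g = [b0, b1 ++ [g], b2] by
          simp [gdl_step, gdl_idx_mid (by omega) h2, List.getD], ih]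
        have h4 : (4 ≤ g ∧ g ≤ 6) := by omega
        have h3 : ¬ g ≥ 7 := by omega
        simp [h1, h4, h3]
      · rw [show gdl_step [b0, b1, b2] g = [b0, b1, b2 ++ [g]] by
          simp [gdl_step, gdl_idx_hi (by omega : (7:Int) ≤ g), List.getD], ih]
        have h3 : g ≥ 7 := by omega
        simp [h1, h2, h3]

-- ===== VERDICT =====
theorem get_difficulty_levels_spec : Claim_equal_get_difficulty_levels := by
  intro grades _
  unfold Spec_get_difficulty_levels get_difficulty_levels get_difficulty_levels_alt
  rw [gdl_fold_inv]
  simp [List.zip]
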